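-- pv_equiv track=rewrite | github.com/jiyeKa/CodingTest | 백준/Silver/1697. 숨바꼭질/숨바꼭질.py | bfs
-- ===== SOURCE A (Python) =====
-- from collections import deque
--
-- def bfs(N,K):
--     q=deque([(N,0)])
--     visited=[False for i in range(100001)]
--
--     while q:
--         pos,sec=q.popleft()
--         visited[pos]=True
--
--         if pos==K:
--             return sec
--
--         for pos in (pos-1,pos+1,pos*2):
--             if 0<=pos<100001 and not visited[pos]:
--                 visited[pos]=True
--                 q.append((pos,sec+1))
-- ===== SOURCE B (Python) =====
-- def bfs(N, K):
--     # Search BACKWARD from K over the inverse moves (v+1 came from v, v-1 came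
--     # from v, 2v came from v), level by level, until N is found.
--     visited = [False] * 100001
--     visited[K] = True
--     frontier = [K]
--     sec = 0
--     while frontier:
--         if N in frontier:
--             return sec
--         nxt = []
--         for p in frontier:
--             for v in (p - 1, p + 1) + ((p // 2,) if p % 2 == 0 else ()):
--                 if 0 <= v < 100001 and not visited[v]:
--                     visited[v] = True
--                     nxt.append(v)
--         frontier = nxt
--         sec += 1
-- ===== Notes on version B (the rewrite author's own statement) =====
-- stated objective: alternative
-- what changed: B searches BACKWARD from K over the inverse move graph (predecessors p-1, p+1 and p//2 when p is even) level by level until N is found, instead of A's forward deque BFS from N with moves -1,+1,*2; correctness rests on path reversal: forward paths N->K inside [0,100000] correspond exactly to backward paths K->N.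
-- outside the precondition, e.g. on bfs(-1, 5): A returns 5, B returns None; on bfs(7, 100002): A returns None, B raises IndexError
import Mathlib
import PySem

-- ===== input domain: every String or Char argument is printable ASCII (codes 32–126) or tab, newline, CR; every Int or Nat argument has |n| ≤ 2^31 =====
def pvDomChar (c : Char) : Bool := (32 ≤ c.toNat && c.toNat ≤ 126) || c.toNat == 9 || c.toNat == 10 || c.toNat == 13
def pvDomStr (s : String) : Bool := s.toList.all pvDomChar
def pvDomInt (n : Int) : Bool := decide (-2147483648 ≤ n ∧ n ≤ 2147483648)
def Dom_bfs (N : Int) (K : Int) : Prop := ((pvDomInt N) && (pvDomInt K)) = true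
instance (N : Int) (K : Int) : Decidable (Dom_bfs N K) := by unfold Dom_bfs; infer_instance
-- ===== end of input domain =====

-- B searches BACKWARD from K over the inverse move graph (predecessors p-1, p+1, and p//2 when
-- p is even), level by level, until N is found — instead of A's forward deque BFS from N with
-- moves -1,+1,*2; objective: alternative algorithm (reversed traversal), same cost.

-- ===== PORT A =====
-- Python's `visited`, a list of 100001 booleans, as a fixed-size array of booleans.
-- Indexing goes through Int.toNat: exact for the indices 0 ≤ i < 100001 actually
-- touched on inputs satisfying Pre_bfs (Python's negative-index wraparound is not modelled).
def Vis : Type := {a : Array Bool // a.size = 100001}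

def visGet (v : Vis) (i : Int) : Bool := v.val.getD i.toNat false
def visSet (v : Vis) (i : Int) : Vis :=
  ⟨v.val.setIfInBounds i.toNat true, by rw [Array.size_setIfInBounds]; exact v.2⟩
-- visited = [False for i in range(100001)]
def vis0 : Vis := ⟨Array.replicate 100001 false, by simp⟩
-- number of False entries, used only as the termination measure of the loops
def countFalse (v : Vis) : Nat := v.val.toList.count false

-- one candidate neighbour of A's inner for-loop:
-- 'if 0<=pos<100001 and not visited[pos]: visited[pos]=True; q.append((pos,sec+1))'
def pushA (sec : Int) (st : List (Int × Int) × Vis) (v : Int) : List (Int × Int) × Vis :=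
  if 0 ≤ v ∧ v < 100001 ∧ visGet st.2 v = false then (st.1 ++ [(v, sec + 1)], visSet st.2 v)
  else st

-- termination lemmas, cited by the loops' decreasing_by
theorem countFalse_visSet_le (v : Vis) (i : Int) : countFalse (visSet v i) ≤ countFalse v := by
  unfold countFalse visSet
  simp only [Array.toList_setIfInBounds]
  by_cases h : i.toNat < v.val.toList.length
  · rw [List.count_set h]
    by_cases e : v.val.toList[i.toNat] = false
    · simp [e]
    · simp [e]
  · rw [List.set_eq_of_length_le (Nat.le_of_not_lt h)]

theorem countFalse_visSet_flip (v : Vis) (i : Int) (h0 : 0 ≤ i) (h1 : i < 100001)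
    (hf : visGet v i = false) : countFalse (visSet v i) + 1 = countFalse v := by
  have hlen : v.val.toList.length = 100001 := by simp [v.2]
  have hlt : i.toNat < v.val.toList.length := by rw [hlen]; omega
  have hget : v.val.toList[i.toNat] = false := by
    have h' : v.val[i.toNat]?.getD false = false := by
      unfold visGet at hf
      rwa [Array.getD_eq_getD_getElem?] at hf
    rw [← Array.getElem?_toList] at h'
    rwa [List.getElem?_eq_getElem hlt, Option.getD_some] at h'
  have hmem : false ∈ v.val.toList := by
    rw [← hget]; exact v.val.toList.getElem_mem hlt
  have hpos : 0 < v.val.toList.count false := List.count_pos_iff.mpr hmem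
  have hpos' : 0 < Array.count false v.val := by simpa using hpos
  unfold countFalse visSet
  simp only [Array.toList_setIfInBounds]
  rw [List.count_set hlt, hget]
  simp only [BEq.rfl, if_true]
  norm_num
  omega

def muA (st : List (Int × Int) × Vis) : Nat := countFalse st.2 + st.1.length

theorem muA_pushA (sec : Int) (st : List (Int × Int) × Vis) (v : Int) :
    muA (pushA sec st v) = muA st := by
  unfold pushA
  split
  · rename_i h
    unfold muA
    simp only [List.length_append, List.length_cons, List.length_nil]
    have := countFalse_visSet_flip st.2 v h.1 h.2.1 h.2.2
    omega
  · rfl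

theorem muA_foldl (sec : Int) (vs : List Int) :
    ∀ st : List (Int × Int) × Vis, muA (vs.foldl (pushA sec) st) = muA st := by
  induction vs with
  | nil => intro st; rfl
  | cons a vs ih => intro st; rw [List.foldl_cons, ih, muA_pushA]

def loopA (K : Int) (q : List (Int × Int)) (vis : Vis) : Int :=
  match q with
  | [] => -1  -- Python: the while loop exhausts the queue and the function returns None; excluded by Pre_bfs
  | (pos, sec) :: rest =>
    let vis1 := visSet vis pos      -- visited[pos] = True
    if pos = K then sec
    else
      let st := [pos - 1, pos + 1, pos * 2].foldl (pushA sec) (rest, vis1)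
      loopA K st.1 st.2
termination_by countFalse vis + q.length
decreasing_by
  have h := muA_foldl sec [pos - 1, pos + 1, pos * 2] (rest, visSet vis pos)
  have h2 := countFalse_visSet_le vis pos
  unfold muA at h
  dsimp only at h
  simp only [List.length_cons]
  omega

def bfs (N : Int) (K : Int) : Int := loopA K [(N, 0)] vis0

-- ===== PORT B =====
-- one candidate of B's inner for-loop:
-- 'if 0 <= v < 100001 and not visited[v]: visited[v]=True; nxt.append(v)'
def push (st : List Int × Vis) (v : Int) : List Int × Vis :=
  if 0 ≤ v ∧ v < 100001 ∧ visGet st.2 v = false then (st.1 ++ [v], visSet st.2 v) else st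

-- '(p - 1, p + 1) + ((p // 2,) if p % 2 == 0 else ())'
def candB (p : Int) : List Int :=
  [p - 1, p + 1] ++ (if PySem.Int.mod p 2 = 0 then [PySem.Int.floordiv p 2] else [])

-- the two nested for-loops building the next frontier (generic in the candidate generator)
def expandL (cand : Int → List Int) (frontier : List Int) (vis : Vis) : List Int × Vis :=
  frontier.foldl (fun st p => (cand p).foldl push st) ([], vis)

def muL (st : List Int × Vis) : Nat := countFalse st.2 + st.1.length

theorem muL_push (st : List Int × Vis) (v : Int) : muL (push st v) = muL st := by
  unfold push
  split
  · rename_i h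
    unfold muL
    simp only [List.length_append, List.length_cons, List.length_nil]
    have := countFalse_visSet_flip st.2 v h.1 h.2.1 h.2.2
    omega
  · rfl

theorem muL_foldl (vs : List Int) : ∀ st : List Int × Vis, muL (vs.foldl push st) = muL st := by
  induction vs with
  | nil => intro st; rfl
  | cons a vs ih => intro st; rw [List.foldl_cons, ih, muL_push]

theorem muL_expand_aux (cand : Int → List Int) (L : List Int) :
    ∀ st : List Int × Vis,
      muL (L.foldl (fun st p => (cand p).foldl push st) st) = muL st := by
  induction L with
  | nil => intro st; rfl
  | cons p L ih => intro st; rw [List.foldl_cons, ih, muL_foldl]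

def loopLvl (cand : Int → List Int) (tgt : Int) (sec : Int) (frontier : List Int) (vis : Vis) : Int :=
  if h : frontier = [] then -1  -- Python: the while loop exits and the function returns None; excluded by Pre_bfs
  else if tgt ∈ frontier then sec
  else
    let st := expandL cand frontier vis
    loopLvl cand tgt (sec + 1) st.1 st.2
termination_by countFalse vis + frontier.length
decreasing_by
  have hmu := muL_expand_aux cand frontier (([] : List Int), vis)
  unfold muL at hmu
  dsimp only at hmu
  unfold expandL
  have := List.length_pos_of_ne_nil h
  simp only [List.length_nil] at hmu
  omega

def bfs_alt (N : Int) (K : Int) : Int := loopLvl candB N 0 [K] (visSet vis0 K)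

-- ===== PRECONDITION & SPEC =====
-- Pre_bfs excludes the inputs where A raises IndexError or returns None (not an Int), and the
-- wraparound inputs N = -1, K ∈ [0,100000] where A's negative-index write lets the search leak
-- from -1 into 0 and return a value that is an artefact of Python list wraparound (B returns None
-- there).  Exactly the inputs on which A's value is an ordinary int remain: the search box
-- 0 ≤ N,K ≤ 100000, plus the diagonal K = N with -100001 ≤ N < 0 (A returns 0 at once).
def Pre_bfs (N : Int) (K : Int) : Prop :=
  (0 ≤ N ∧ N ≤ 100000 ∧ 0 ≤ K ∧ K ≤ 100000) ∨ (-100001 ≤ N ∧ N < 0 ∧ K = N)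
instance (N : Int) (K : Int) : Decidable (Pre_bfs N K) := by unfold Pre_bfs; infer_instance

def pvWitness_bfs : Int × Int := (1, 2)

def Spec_bfs (N : Int) (K : Int) (out : Int) : Prop := out = bfs_alt N K
instance (N : Int) (K : Int) (out : Int) : Decidable (Spec_bfs N K out) := by unfold Spec_bfs; infer_instance

-- ===== CLAIM (what is proved, stated in full; the proofs are below) =====
def Claim_equal_bfs : Prop := ∀ (N : Int) (K : Int), Dom_bfs N K → Pre_bfs N K → Spec_bfs N K (bfs N K)

-- ===== LEMMAS AND PROOFS =====

-- forward candidate list, A's '(pos-1, pos+1, pos*2)'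
def candF (p : Int) : List Int := [p - 1, p + 1, p * 2]

-- basic visited-array lemmas
theorem loopA_nil (K : Int) (vis : Vis) : loopA K [] vis = -1 := by
  rw [loopA.eq_def]

theorem loopA_cons (K pos sec : Int) (rest : List (Int × Int)) (vis : Vis) :
    loopA K ((pos, sec) :: rest) vis =
      if pos = K then sec
      else
        loopA K (([pos - 1, pos + 1, pos * 2].foldl (pushA sec) (rest, visSet vis pos)).1)
          (([pos - 1, pos + 1, pos * 2].foldl (pushA sec) (rest, visSet vis pos)).2) := by
  rw [loopA.eq_def]

theorem loopLvl_eq (cand : Int → List Int) (tgt sec : Int) (F : List Int) (vis : Vis) :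
    loopLvl cand tgt sec F vis =
      if F = [] then -1
      else if tgt ∈ F then sec
      else loopLvl cand tgt (sec + 1) (expandL cand F vis).1 (expandL cand F vis).2 := by
  rw [loopLvl.eq_def]
  by_cases h : F = []
  · simp [h]
  · rw [dif_neg h, if_neg h]

theorem list_set_true_of_getD (l : List Bool) (i : Nat) (h : l.getD i false = true) :
    l.set i true = l := by
  apply List.ext_getElem?
  intro j
  rw [List.getElem?_set]
  split
  · rename_i hij
    subst hij
    rw [List.getD_eq_getElem?_getD] at h
    by_cases hr : i < l.length
    · rw [if_pos hr]
      rw [List.getElem?_eq_getElem hr] at h ⊢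
      simp at h
      rw [h]
    · rw [if_neg hr]
      rw [List.getElem?_eq_none (Nat.le_of_not_lt hr)] at h
      simp at h
  · rfl

theorem visSet_of_true (v : Vis) (i : Int) (h : visGet v i = true) : visSet v i = v := by
  unfold visGet at h
  rw [Array.getD_eq_getD_getElem?] at h
  apply Subtype.ext
  rw [← Array.toList_inj]
  unfold visSet
  simp only [Array.toList_setIfInBounds]
  apply list_set_true_of_getD
  rw [List.getD_eq_getElem?_getD, Array.getElem?_toList]
  exact h

theorem visGet_visSet_self (v : Vis) (i : Int) (h0 : 0 ≤ i) (h1 : i < 100001) :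
    visGet (visSet v i) i = true := by
  unfold visGet visSet
  rw [Array.getD_eq_getD_getElem?]
  simp only
  rw [← Array.getElem?_toList, Array.toList_setIfInBounds, List.getElem?_set]
  have hlen : v.val.toList.length = 100001 := by simp [v.2]
  rw [if_pos rfl, if_pos (by omega)]
  rfl

theorem visGet_visSet_of_true (v : Vis) (i j : Int) (h : visGet v j = true) :
    visGet (visSet v i) j = true := by
  unfold visGet visSet at *
  rw [Array.getD_eq_getD_getElem?] at h ⊢
  simp only
  rw [← Array.getElem?_toList, Array.toList_setIfInBounds, List.getElem?_set]
  rw [← Array.getElem?_toList] at h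
  split
  · rename_i hij
    split
    · rfl
    · rename_i hr
      rw [hij] at hr
      rw [List.getElem?_eq_none (Nat.le_of_not_lt hr)] at h
      simp at h
  · exact h

-- reading another in-box cell is unchanged by an in-box write
theorem visGet_visSet_ne (v : Vis) (i j : Int) (hi0 : 0 ≤ i) (hj0 : 0 ≤ j) (hne : j ≠ i) :
    visGet (visSet v i) j = visGet v j := by
  unfold visGet visSet
  rw [Array.getD_eq_getD_getElem?, Array.getD_eq_getD_getElem?]
  simp only
  rw [← Array.getElem?_toList, Array.toList_setIfInBounds, List.getElem?_set,
    ← Array.getElem?_toList]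
  rw [if_neg (by omega)]

theorem visGet_vis0 (p : Int) : visGet vis0 p = false := by
  unfold visGet vis0
  rw [Array.getD_eq_getD_getElem?]
  simp only [Array.getElem?_replicate]
  split <;> rfl

-- visitedness is preserved by push and its folds
theorem visGet_push_of_true (st : List Int × Vis) (v p : Int) (h : visGet st.2 p = true) :
    visGet (push st v).2 p = true := by
  unfold push
  split
  · exact visGet_visSet_of_true _ _ _ h
  · exact h

theorem visGet_foldl_push_of_true (vs : List Int) :
    ∀ (st : List Int × Vis) (p : Int), visGet st.2 p = true →
      visGet (vs.foldl push st).2 p = true := by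
  induction vs with
  | nil => intro st p h; exact h
  | cons a vs ih => intro st p h; rw [List.foldl_cons]; exact ih _ _ (visGet_push_of_true _ _ _ h)

-- characterization of one inner fold (over the candidate list cs)
theorem fold_push_char (cs : List Int) :
    ∀ st : List Int × Vis,
      (∀ p, 0 ≤ p → p < 100001 →
        (visGet (cs.foldl push st).2 p = true ↔ visGet st.2 p = true ∨ p ∈ cs)) ∧
      (∀ p, p ∈ (cs.foldl push st).1 ↔
        p ∈ st.1 ∨ (0 ≤ p ∧ p < 100001 ∧ visGet st.2 p = false ∧ p ∈ cs)) := by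
  induction cs with
  | nil =>
    intro st
    constructor
    · intro p _ _; simp
    · intro p; simp
  | cons a cs ih =>
    intro st
    have hmain := ih (push st a)
    constructor
    · intro p h0 h1
      rw [List.foldl_cons, (hmain.1 p h0 h1)]
      unfold push
      split
      · rename_i hc
        simp only
        by_cases hpa : p = a
        · subst hpa
          rw [visGet_visSet_self _ _ h0 h1]
          simp
        · rw [visGet_visSet_ne _ _ _ hc.1 h0 hpa]
          simp only [List.mem_cons]
          tauto
      · rename_i hc
        simp only [List.mem_cons]
        push_neg at hc
        constructor
        · rintro (hv | hm)
          · exact Or.inl hv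
          · exact Or.inr (Or.inr hm)
        · rintro (hv | rfl | hm)
          · exact Or.inl hv
          · left
            cases hbv : visGet st.2 p with
            | false => exact absurd hbv (hc h0 h1)
            | true => rfl
          · exact Or.inr hm
    · intro p
      rw [List.foldl_cons, (hmain.2 p)]
      unfold push
      split
      · rename_i hc
        simp only [List.mem_append, List.mem_cons, List.not_mem_nil, or_false]
        constructor
        · rintro ((hm | rfl) | ⟨h0, h1, hv, hm⟩)
          · exact Or.inl hm
          · exact Or.inr ⟨hc.1, hc.2.1, hc.2.2, Or.inl rfl⟩
          · refine Or.inr ⟨h0, h1, ?_, Or.inr hm⟩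
            by_cases hpa : p = a
            · subst hpa; exact hc.2.2
            · rwa [visGet_visSet_ne _ _ _ hc.1 h0 hpa] at hv
        · rintro (hm | ⟨h0, h1, hv, rfl | hm⟩)
          · exact Or.inl (Or.inl hm)
          · exact Or.inl (Or.inr rfl)
          · by_cases hpa : p = a
            · subst hpa; exact Or.inl (Or.inr rfl)
            · exact Or.inr ⟨h0, h1, by rwa [visGet_visSet_ne _ _ _ hc.1 h0 hpa], hm⟩
      · rename_i hc
        simp only [List.mem_cons]
        push_neg at hc
        constructor
        · rintro (hm | ⟨h0, h1, hv, hm⟩)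
          · exact Or.inl hm
          · exact Or.inr ⟨h0, h1, hv, Or.inr hm⟩
        · rintro (hm | ⟨h0, h1, hv, rfl | hm⟩)
          · exact Or.inl hm
          · exact absurd hv (hc h0 h1)
          · exact Or.inr ⟨h0, h1, hv, hm⟩

-- characterization of the whole expansion fold
theorem expand_fold_char (cand : Int → List Int) (F : List Int) :
    ∀ st : List Int × Vis,
      (∀ p, 0 ≤ p → p < 100001 →
        (visGet (F.foldl (fun st q => (cand q).foldl push st) st).2 p = true ↔
          visGet st.2 p = true ∨ ∃ q ∈ F, p ∈ cand q)) ∧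
      (∀ p, p ∈ (F.foldl (fun st q => (cand q).foldl push st) st).1 ↔
        p ∈ st.1 ∨ (0 ≤ p ∧ p < 100001 ∧ visGet st.2 p = false ∧ ∃ q ∈ F, p ∈ cand q)) := by
  induction F with
  | nil =>
    intro st
    constructor
    · intro p _ _; simp
    · intro p; simp
  | cons q F ih =>
    intro st
    have hin := fold_push_char (cand q) st
    have hmain := ih ((cand q).foldl push st)
    constructor
    · intro p h0 h1
      rw [List.foldl_cons, hmain.1 p h0 h1, hin.1 p h0 h1]
      simp only [List.mem_cons]
      constructor
      · rintro ((hv | hm) | ⟨r, hr, hm⟩)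
        · exact Or.inl hv
        · exact Or.inr ⟨q, Or.inl rfl, hm⟩
        · exact Or.inr ⟨r, Or.inr hr, hm⟩
      · rintro (hv | ⟨r, rfl | hr, hm⟩)
        · exact Or.inl (Or.inl hv)
        · exact Or.inl (Or.inr hm)
        · exact Or.inr ⟨r, hr, hm⟩
    · intro p
      rw [List.foldl_cons, hmain.2 p, hin.2 p]
      constructor
      · rintro ((hm | ⟨h0, h1, hv, hm⟩) | ⟨h0, h1, hv2, r, hr, hm⟩)
        · exact Or.inl hm
        · exact Or.inr ⟨h0, h1, hv, q, List.mem_cons_self .., hm⟩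
        · have hvst : visGet st.2 p = false := by
            cases hb : visGet st.2 p with
            | false => rfl
            | true =>
              have := visGet_foldl_push_of_true (cand q) st p hb
              rw [this] at hv2; cases hv2
          exact Or.inr ⟨h0, h1, hvst, r, List.mem_cons_of_mem _ hr, hm⟩
      · rintro (hm | ⟨h0, h1, hv, r, hr, hm⟩)
        · exact Or.inl (Or.inl hm)
        · rcases List.mem_cons.mp hr with rfl | hr'
          · exact Or.inl (Or.inr ⟨h0, h1, hv, hm⟩)
          · by_cases hq : visGet (List.foldl push st (cand q)).2 p = true
            · rcases (hin.1 p h0 h1).mp hq with hb | hcq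
              · rw [hb] at hv; cases hv
              · exact Or.inl (Or.inr ⟨h0, h1, hv, hcq⟩)
            · have hq' : visGet (List.foldl push st (cand q)).2 p = false := by
                cases h2 : visGet (List.foldl push st (cand q)).2 p with
                | false => rfl
                | true => exact absurd h2 hq
              exact Or.inr ⟨h0, h1, hq', r, hr', hm⟩

-- transfer: A's neighbour fold is the level fold with the pairs (·, sec+1) appended
theorem foldl_pushA_eq (s : Int) (vs : List Int) :
    ∀ (q : List (Int × Int)) (l : List Int) (vis : Vis),
      vs.foldl (pushA s) (q ++ l.map (fun v => (v, s + 1)), vis) =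
        (q ++ ((vs.foldl push (l, vis)).1.map (fun v => (v, s + 1))),
         (vs.foldl push (l, vis)).2) := by
  induction vs with
  | nil => intro q l vis; rfl
  | cons a vs ih =>
    intro q l vis
    rw [List.foldl_cons, List.foldl_cons]
    unfold pushA push
    simp only
    split
    · have h1 : (q ++ l.map (fun v => (v, s + 1))) ++ [(a, s + 1)] =
          q ++ (l ++ [a]).map (fun v => (v, s + 1)) := by
        simp [List.map_append]
      rw [h1]
      exact ih q (l ++ [a]) (visSet vis a)
    · exact ih q l vis

-- A processes one whole level L from the queue: returns s if K occurs in L, else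
-- continues with the next level computed exactly as the level loop computes it
theorem loopA_level (K s : Int) :
    ∀ (L acc : List Int) (vis : Vis),
      (∀ p ∈ L, visGet vis p = true) →
      loopA K (L.map (fun v => (v, s)) ++ acc.map (fun v => (v, s + 1))) vis =
        (if K ∈ L then s
         else
           loopA K
             ((L.foldl (fun st p => (candF p).foldl push st) (acc, vis)).1.map
               (fun v => (v, s + 1)))
             (L.foldl (fun st p => (candF p).foldl push st) (acc, vis)).2) := by
  intro L
  induction L with
  | nil =>
    intro acc vis _
    simp
  | cons p L ih =>
    intro acc vis hvis
    have hp : visGet vis p = true := hvis p (List.mem_cons_self ..)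
    rw [List.map_cons, List.cons_append, loopA_cons]
    rw [visSet_of_true vis p hp]
    by_cases hK : p = K
    · rw [if_pos hK, if_pos (by rw [hK]; exact List.mem_cons_self ..)]
    · rw [if_neg hK]
      have hmem : (K ∈ p :: L) = (K ∈ L) := by
        simp [List.mem_cons]
        intro h; exact absurd h.symm hK
      rw [foldl_pushA_eq s [p - 1, p + 1, p * 2] (L.map (fun v => (v, s))) acc vis]
      set st1 := [p - 1, p + 1, p * 2].foldl push (acc, vis) with hst1
      have hvis' : ∀ q ∈ L, visGet st1.2 q = true := fun q hq =>
        visGet_foldl_push_of_true _ _ _ (hvis q (List.mem_cons_of_mem _ hq))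
      rw [ih st1.1 st1.2 hvis']
      rw [List.foldl_cons]
      have hcf : candF p = [p - 1, p + 1, p * 2] := rfl
      rw [hcf, ← hst1]
      simp only [hmem]

-- A's queue BFS equals the forward level loop (strong induction on the measure)
theorem loopA_eq_loopLvl (K : Int) :
    ∀ (n : Nat) (s : Int) (L : List Int) (vis : Vis),
      countFalse vis + L.length ≤ n →
      (∀ p ∈ L, visGet vis p = true) →
      loopA K (L.map (fun v => (v, s))) vis = loopLvl candF K s L vis := by
  intro n
  induction n with
  | zero =>
    intro s L vis hn _
    have : L = [] := by
      cases L with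
      | nil => rfl
      | cons a L => simp [List.length_cons] at hn
    subst this
    simp only [List.map_nil]
    rw [loopA_nil, loopLvl_eq]
    simp
  | succ n ih =>
    intro s L vis hn hvis
    cases hL : L with
    | nil =>
      simp only [List.map_nil]
      rw [loopA_nil, loopLvl_eq]
      simp
    | cons a L' =>
      rw [← hL]
      have hne : L ≠ [] := by rw [hL]; simp
      have h1 : L.map (fun v => (v, s)) =
          L.map (fun v => (v, s)) ++ ([] : List Int).map (fun v => (v, s + 1)) := by simp
      rw [h1, loopA_level K s L [] vis hvis]
      rw [loopLvl_eq]
      rw [if_neg hne]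
      by_cases hK : K ∈ L
      · rw [if_pos hK, if_pos hK]
      · rw [if_neg hK, if_neg hK]
        set st := expandL candF L vis with hst
        have hstdef : st = L.foldl (fun st p => (candF p).foldl push st) ([], vis) := by
          rw [hst]; rfl
        have hmu := muL_expand_aux candF L (([] : List Int), vis)
        rw [← hstdef] at hmu
        unfold muL at hmu
        simp only [List.length_nil, Nat.add_zero] at hmu
        have hlen : 0 < L.length := List.length_pos_of_ne_nil hne
        have hinv : ∀ p ∈ st.1, visGet st.2 p = true := by
          rw [hstdef]
          have := (expand_fold_char candF L (([] : List Int), vis)).2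
          intro p hp
          rw [this p] at hp
          rcases hp with hp | ⟨h0, h1', _, ⟨q2, hq2, hm⟩⟩
          · simp at hp
          · rw [(expand_fold_char candF L (([] : List Int), vis)).1 p h0 h1']
            exact Or.inr ⟨q2, hq2, hm⟩
        have hbound : countFalse st.2 + st.1.length ≤ n := by omega
        have := ih (s + 1) st.1 st.2 hbound hinv
        rw [← hstdef]
        exact this

-- ===== the abstract reachability relation and BFS-level correctness =====

def NstepC (cand : Int → List Int) (u v : Int) : Prop := v ∈ cand u ∧ 0 ≤ v ∧ v < 100001

inductive ReachC (cand : Int → List Int) (src : Int) : Nat → Int → Prop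
  | zero : ReachC cand src 0 src
  | succ {n : Nat} {u v : Int} : ReachC cand src n u → NstepC cand u v → ReachC cand src (n + 1) v

theorem reach_zero_iff (cand : Int → List Int) (src v : Int) :
    ReachC cand src 0 v ↔ v = src := by
  constructor
  · intro h; cases h; rfl
  · rintro rfl; exact ReachC.zero

theorem reach_succ_iff (cand : Int → List Int) (src : Int) (n : Nat) (v : Int) :
    ReachC cand src (n + 1) v ↔ ∃ u, ReachC cand src n u ∧ NstepC cand u v := by
  constructor
  · intro h; cases h with | succ hu hs => exact ⟨_, hu, hs⟩
  · rintro ⟨u, hu, hs⟩; exact ReachC.succ hu hs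

theorem reach_box (cand : Int → List Int) (src : Int) (hs : 0 ≤ src ∧ src < 100001) :
    ∀ {n : Nat} {v : Int}, ReachC cand src n v → 0 ≤ v ∧ v < 100001 := by
  intro n v h
  induction h with
  | zero => exact hs
  | succ _ hs2 _ => exact hs2.2

theorem reach_first (cand : Int → List Int) :
    ∀ (n : Nat) (s v : Int), ReachC cand s (n + 1) v ↔ ∃ u, NstepC cand s u ∧ ReachC cand u n v := by
  intro n
  induction n with
  | zero =>
    intro s v
    rw [reach_succ_iff]
    constructor
    · rintro ⟨u, hu, hs⟩
      rw [reach_zero_iff] at hu; subst hu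
      exact ⟨v, hs, ReachC.zero⟩
    · rintro ⟨u, hs, hu⟩
      rw [reach_zero_iff] at hu; subst hu
      exact ⟨s, ReachC.zero, hs⟩
  | succ n ih =>
    intro s v
    rw [reach_succ_iff]
    constructor
    · rintro ⟨w, hw, hs⟩
      rcases (ih s w).mp hw with ⟨u, hsu, hw'⟩
      exact ⟨u, hsu, ReachC.succ hw' hs⟩
    · rintro ⟨u, hsu, hv⟩
      cases hv with
      | succ hw hs => exact ⟨_, (ih s _).mpr ⟨u, hsu, hw⟩, hs⟩

def ExactC (cand : Int → List Int) (src : Int) (n : Nat) (v : Int) : Prop :=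
  ReachC cand src n v ∧ ∀ m < n, ¬ ReachC cand src m v

theorem exact_of_reach (cand : Int → List Int) (src : Int) :
    ∀ (n : Nat) (v : Int), ReachC cand src n v → ∃ m ≤ n, ExactC cand src m v := by
  intro n
  induction n using Nat.strong_induction_on with
  | _ n ih =>
    intro v hv
    by_cases h : ∃ m < n, ReachC cand src m v
    · rcases h with ⟨m, hm, hr⟩
      rcases ih m hm v hr with ⟨m', hm', he⟩
      exact ⟨m', by omega, he⟩
    · push_neg at h
      exact ⟨n, le_refl n, hv, h⟩

theorem exact_pred (cand : Int → List Int) (src : Int) (n : Nat) (v : Int)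
    (h : ExactC cand src (n + 1) v) : ∃ u, ExactC cand src n u ∧ NstepC cand u v := by
  rcases (reach_succ_iff cand src n v).mp h.1 with ⟨u, hu, hs⟩
  rcases exact_of_reach cand src n u hu with ⟨m, hm, he⟩
  have hmn : m = n := by
    by_contra hne
    have hml : m < n := by omega
    exact h.2 (m + 1) (by omega) (ReachC.succ he.1 hs)
  subst hmn
  exact ⟨u, he, hs⟩

theorem exact_empty (cand : Int → List Int) (src : Int) (s : Nat)
    (h : ∀ p, ¬ ExactC cand src s p) :
    ∀ (k : Nat) (p : Int), ¬ ExactC cand src (s + k) p := by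
  intro k
  induction k with
  | zero => exact h
  | succ k ih =>
    intro p hp
    rcases exact_pred cand src (s + k) p hp with ⟨u, hu, _⟩
    exact ih u hu

-- the level-loop invariants
def FrSpec (cand : Int → List Int) (src : Int) (lvl : Nat) (F : List Int) : Prop :=
  ∀ p, p ∈ F ↔ ExactC cand src lvl p

def ViSpec (cand : Int → List Int) (src : Int) (lvl : Nat) (V : Vis) : Prop :=
  ∀ p, 0 ≤ p → p < 100001 → (visGet V p = true ↔ ∃ m ≤ lvl, ReachC cand src m p)

theorem level_step (cand : Int → List Int) (src : Int) (hs : 0 ≤ src ∧ src < 100001)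
    (lvl : Nat) (F : List Int) (V : Vis) (hF : FrSpec cand src lvl F)
    (hV : ViSpec cand src lvl V) :
    FrSpec cand src (lvl + 1) (expandL cand F V).1 ∧
    ViSpec cand src (lvl + 1) (expandL cand F V).2 := by
  have hch := expand_fold_char cand F (([] : List Int), V)
  constructor
  · intro p
    have hmem := hch.2 p
    simp only [List.not_mem_nil, false_or] at hmem
    rw [show (expandL cand F V).1 = (F.foldl (fun st q => (cand q).foldl push st) ([], V)).1 from rfl]
    rw [hmem]
    constructor
    · rintro ⟨h0, h1, hv, q, hq, hm⟩
      have hq' := (hF q).mp hq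
      have hreach : ReachC cand src (lvl + 1) p := ReachC.succ hq'.1 ⟨hm, h0, h1⟩
      refine ⟨hreach, ?_⟩
      intro m hmlt hr
      have : visGet V p = true := (hV p h0 h1).mpr ⟨m, by omega, hr⟩
      simp [this] at hv
    · intro hE
      have hbox := reach_box cand src hs hE.1
      have hvv : visGet V p = false := by
        rcases Bool.eq_false_or_eq_true (visGet V p) with hb | hb
        · rcases (hV p hbox.1 hbox.2).mp hb with ⟨m, hm, hr⟩
          exact absurd hr (hE.2 m (by omega))
        · exact hb
      rcases (reach_succ_iff cand src lvl p).mp hE.1 with ⟨u, hu, hstep⟩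
      rcases exact_of_reach cand src lvl u hu with ⟨m, hm, he⟩
      have hmeq : m = lvl := by
        by_contra hne
        exact hE.2 (m + 1) (by omega) (ReachC.succ he.1 hstep)
      subst hmeq
      exact ⟨hbox.1, hbox.2, hvv, u, (hF u).mpr he, hstep.1⟩
  · intro p h0 h1
    have hvis := hch.1 p h0 h1
    rw [show (expandL cand F V).2 = (F.foldl (fun st q => (cand q).foldl push st) ([], V)).2 from rfl]
    rw [hvis]
    constructor
    · rintro (hv | ⟨q, hq, hm⟩)
      · rcases (hV p h0 h1).mp hv with ⟨m, hm', hr⟩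
        exact ⟨m, by omega, hr⟩
      · have hq' := (hF q).mp hq
        exact ⟨lvl + 1, le_refl _, ReachC.succ hq'.1 ⟨hm, h0, h1⟩⟩
    · rintro ⟨m, hm, hr⟩
      by_cases hle : m ≤ lvl
      · exact Or.inl ((hV p h0 h1).mpr ⟨m, hle, hr⟩)
      · have hmeq : m = lvl + 1 := by omega
        subst hmeq
        rcases exact_of_reach cand src (lvl + 1) p hr with ⟨m', hm', he⟩
        by_cases hle2 : m' ≤ lvl
        · exact Or.inl ((hV p h0 h1).mpr ⟨m', hle2, he.1⟩)
        · have : m' = lvl + 1 := by omega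
          subst this
          rcases exact_pred cand src lvl p he with ⟨u, hu, hstep⟩
          exact Or.inr ⟨u, (hF u).mpr hu, hstep.1⟩

-- the result relation characterizing both loops
def Res (cand : Int → List Int) (src tgt : Int) (r : Int) : Prop :=
  (∃ n : Nat, r = (n : Int) ∧ ReachC cand src n tgt ∧ ∀ m < n, ¬ ReachC cand src m tgt) ∨
  (r = -1 ∧ ∀ n : Nat, ¬ ReachC cand src n tgt)

theorem res_unique (cand : Int → List Int) (src tgt : Int) (r r' : Int)
    (h : Res cand src tgt r) (h' : Res cand src tgt r') : r = r' := by
  rcases h with ⟨n, rfl, hr, hmin⟩ | ⟨rfl, hnone⟩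
  · rcases h' with ⟨n', rfl, hr', hmin'⟩ | ⟨rfl, hnone'⟩
    · have h1 : ¬ n < n' := fun hlt => hmin' n hlt hr
      have h2 : ¬ n' < n := fun hlt => hmin n' hlt hr'
      have : n = n' := by omega
      rw [this]
    · exact absurd hr (hnone' n)
  · rcases h' with ⟨n', rfl, hr', _⟩ | ⟨rfl, _⟩
    · exact absurd hr' (hnone n')
    · rfl

-- the level loop computes Res (strong induction on the measure)
theorem loopLvl_res (cand : Int → List Int) (src tgt : Int) (hs : 0 ≤ src ∧ src < 100001) :
    ∀ (fuel : Nat) (lvl : Nat) (F : List Int) (V : Vis),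
      countFalse V + F.length ≤ fuel →
      FrSpec cand src lvl F → ViSpec cand src lvl V →
      (∀ n : Nat, ReachC cand src n tgt → lvl ≤ n) →
      Res cand src tgt (loopLvl cand tgt (lvl : Int) F V) := by
  intro fuel
  induction fuel with
  | zero =>
    intro lvl F V hfuel hF hV hprev
    have hFnil : F = [] := by
      cases F with
      | nil => rfl
      | cons a F' => simp [List.length_cons] at hfuel
    subst hFnil
    rw [loopLvl_eq, if_pos rfl]
    refine Or.inr ⟨rfl, ?_⟩
    intro n hr
    have hempty : ∀ p, ¬ ExactC cand src lvl p := by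
      intro p hp
      simpa using (hF p).mpr hp
    rcases exact_of_reach cand src n tgt hr with ⟨m, _, he⟩
    have hge : lvl ≤ m := hprev m he.1
    have := exact_empty cand src lvl hempty (m - lvl) tgt
    rw [show lvl + (m - lvl) = m by omega] at this
    exact this he
  | succ fuel ih =>
    intro lvl F V hfuel hF hV hprev
    rw [loopLvl_eq]
    by_cases hFnil : F = []
    · subst hFnil
      rw [if_pos rfl]
      refine Or.inr ⟨rfl, ?_⟩
      intro n hr
      have hempty : ∀ p, ¬ ExactC cand src lvl p := by
        intro p hp
        simpa using (hF p).mpr hp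
      rcases exact_of_reach cand src n tgt hr with ⟨m, _, he⟩
      have hge : lvl ≤ m := hprev m he.1
      have := exact_empty cand src lvl hempty (m - lvl) tgt
      rw [show lvl + (m - lvl) = m by omega] at this
      exact this he
    · rw [if_neg hFnil]
      by_cases htgt : tgt ∈ F
      · rw [if_pos htgt]
        have he := (hF tgt).mp htgt
        exact Or.inl ⟨lvl, rfl, he.1, fun m hm => he.2 m hm⟩
      · rw [if_neg htgt]
        have hstep := level_step cand src hs lvl F V hF hV
        have hprev' : ∀ n : Nat, ReachC cand src n tgt → lvl + 1 ≤ n := by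
          intro n hr
          rcases exact_of_reach cand src n tgt hr with ⟨m, hm, he⟩
          have h1 : lvl ≤ m := hprev m he.1
          have h2 : m ≠ lvl := by
            intro hmeq
            subst hmeq
            exact htgt ((hF tgt).mpr he)
          omega
        have hmu := muL_expand_aux cand F (([] : List Int), V)
        have hexp : expandL cand F V = F.foldl (fun st p => (cand p).foldl push st) ([], V) := rfl
        rw [← hexp] at hmu
        unfold muL at hmu
        simp only [List.length_nil, Nat.add_zero] at hmu
        have hlen : 0 < F.length := List.length_pos_of_ne_nil hFnil
        have hbound : countFalse (expandL cand F V).2 + (expandL cand F V).1.length ≤ fuel := by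
          omega
        have := ih (lvl + 1) (expandL cand F V).1 (expandL cand F V).2 hbound hstep.1 hstep.2 hprev'
        rw [show ((lvl : Int) + 1) = ((lvl + 1 : Nat) : Int) by push_cast; ring]
        exact this

-- initial invariants for a boxed source
theorem init_FrSpec (cand : Int → List Int) (src : Int) :
    FrSpec cand src 0 [src] := by
  intro p
  simp only [List.mem_singleton]
  constructor
  · rintro rfl
    exact ⟨ReachC.zero, by omega⟩
  · intro h
    exact (reach_zero_iff cand src p).mp h.1

theorem init_ViSpec (cand : Int → List Int) (src : Int) (hs : 0 ≤ src ∧ src < 100001) :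
    ViSpec cand src 0 (visSet vis0 src) := by
  intro p h0 h1
  constructor
  · intro hv
    by_cases hps : p = src
    · subst hps; exact ⟨0, le_refl _, ReachC.zero⟩
    · rw [visGet_visSet_ne _ _ _ hs.1 h0 hps, visGet_vis0] at hv
      simp at hv
  · rintro ⟨m, hm, hr⟩
    have : m = 0 := by omega
    subst this
    rw [(reach_zero_iff cand src p).mp hr]
    exact visGet_visSet_self _ _ hs.1 hs.2

-- reversal: forward steps inside the box are exactly backward steps
theorem step_rev (u v : Int) (hu : 0 ≤ u ∧ u < 100001) (hv : 0 ≤ v ∧ v < 100001) :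
    NstepC candF u v ↔ NstepC candB v u := by
  unfold NstepC candF candB
  have hmod : PySem.Int.mod v 2 = v % 2 := PySem.Int.mod_eq_emod_of_pos (by omega)
  have hdiv : PySem.Int.floordiv v 2 = v / 2 := PySem.Int.floordiv_eq_ediv_of_pos (by omega)
  rw [hmod, hdiv]
  by_cases hev : v % 2 = 0
  · rw [if_pos hev]
    simp only [List.mem_cons, List.mem_append, List.not_mem_nil, or_false]
    constructor
    · rintro ⟨h, _⟩
      exact ⟨by omega, hu.1, hu.2⟩
    · rintro ⟨h, _⟩
      exact ⟨by omega, hv.1, hv.2⟩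
  · rw [if_neg hev]
    simp only [List.mem_cons, List.mem_append, List.not_mem_nil, or_false]
    constructor
    · rintro ⟨h, _⟩
      exact ⟨by omega, hu.1, hu.2⟩
    · rintro ⟨h, _⟩
      exact ⟨by omega, hv.1, hv.2⟩

theorem reach_rev :
    ∀ (n : Nat) (a b : Int), (0 ≤ a ∧ a < 100001) → (0 ≤ b ∧ b < 100001) →
      (ReachC candF a n b ↔ ReachC candB b n a) := by
  intro n
  induction n with
  | zero =>
    intro a b ha hb
    rw [reach_zero_iff, reach_zero_iff]
    exact ⟨fun h => h.symm, fun h => h.symm⟩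
  | succ n ih =>
    intro a b ha hb
    rw [reach_succ_iff, reach_first]
    constructor
    · rintro ⟨u, hu, hs⟩
      have hub := reach_box candF a ha hu
      exact ⟨u, (step_rev u b hub hb).mp hs, (ih a u ha hub).mp hu⟩
    · rintro ⟨u, hs, hu⟩
      have hub : 0 ≤ u ∧ u < 100001 := ⟨hs.2.1, hs.2.2⟩
      exact ⟨u, (ih a u ha hub).mpr hu, (step_rev u b hub hb).mpr hs⟩

-- ===== VERDICT (by name: the statement is the Claim_ definition above) =====
theorem bfs_spec : Claim_equal_bfs := by
  intro N K _ hpre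
  unfold Spec_bfs bfs bfs_alt
  by_cases hNK : N = K
  · rw [loopA_cons, loopLvl_eq]
    simp [hNK]
  · have hbox : 0 ≤ N ∧ N ≤ 100000 ∧ 0 ≤ K ∧ K ≤ 100000 := by
      rcases hpre with h | h
      · exact h
      · exact absurd h.2.2.symm hNK
    have hNb : 0 ≤ N ∧ N < 100001 := ⟨hbox.1, by omega⟩
    have hKb : 0 ≤ K ∧ K < 100001 := ⟨hbox.2.2.1, by omega⟩
    -- A's side: queue BFS = forward level loop
    have hNget : visGet (visSet vis0 N) N = true :=
      visGet_visSet_self vis0 N hNb.1 hNb.2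
    have hstep : loopA K [(N, 0)] vis0 =
        loopA K ([N].map (fun v => (v, (0 : Int)))) (visSet vis0 N) := by
      rw [List.map_cons, List.map_nil, loopA_cons, loopA_cons]
      rw [visSet_of_true (visSet vis0 N) N hNget]
    rw [hstep]
    rw [loopA_eq_loopLvl K (countFalse (visSet vis0 N) + 1) 0 [N] (visSet vis0 N)
      (by simp) (by intro p hp; simp at hp; subst hp; exact hNget)]
    -- both level loops compute Res for their own direction
    have hresF : Res candF N K (loopLvl candF K ((0 : Nat) : Int) [N] (visSet vis0 N)) :=
      loopLvl_res candF N K hNb (countFalse (visSet vis0 N) + 1) 0 [N] (visSet vis0 N)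
        (by simp) (init_FrSpec candF N) (init_ViSpec candF N hNb) (by intro n _; omega)
    have hresB : Res candB K N (loopLvl candB N ((0 : Nat) : Int) [K] (visSet vis0 K)) :=
      loopLvl_res candB K N hKb (countFalse (visSet vis0 K) + 1) 0 [K] (visSet vis0 K)
        (by simp) (init_FrSpec candB K) (init_ViSpec candB K hKb) (by intro n _; omega)
    -- reversal: the backward Res is a forward Res
    have hresB' : Res candF N K (loopLvl candB N ((0 : Nat) : Int) [K] (visSet vis0 K)) := by
      rcases hresB with ⟨n, heq, hr, hmin⟩ | ⟨heq, hnone⟩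
      · exact Or.inl ⟨n, heq, (reach_rev n N K hNb hKb).mpr hr,
          fun m hm hr' => hmin m hm ((reach_rev m N K hNb hKb).mp hr')⟩
      · exact Or.inr ⟨heq, fun n hr => hnone n ((reach_rev n N K hNb hKb).mp hr)⟩
    have := res_unique candF N K _ _ hresF hresB'
    simpa using this
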